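-- pv_equiv track=rewrite | github.com/olsenw/LeetCodeExercises | Python3/valid_mountain_array.py | validMountainArray_leetcode
-- ===== SOURCE A (Python) =====
-- from typing import List
--
-- def validMountainArray_leetcode(arr: List[int]) -> bool:
--     N = len(arr)
--     i = 0
--
--     # walk up
--     while i+1 < N and arr[i] < arr[i+1]:
--         i += 1
--
--     # peak can't be first or last
--     if i == 0 or i == N-1:
--         return False
--
--     # walk down
--     while i+1 < N and arr[i] > arr[i+1]:
--         i += 1
--
--     return i == N-1
-- ===== SOURCE B (Python) =====
-- from typing import List
--
-- def validMountainArray_leetcode(arr: List[int]) -> bool: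
--     # single pass over adjacent pairs with a tiny finite-state machine
--     went_up = False
--     went_down = False
--     ok = True
--     for a, b in zip(arr, arr[1:]):
--         if a < b:
--             ok = ok and not went_down
--             went_up = True
--         elif a > b:
--             ok = ok and went_up
--             went_down = True
--         else:
--             ok = False
--     return ok and went_up and went_down
-- ===== Notes on version B (the rewrite author's own statement) =====
-- stated objective: alternative
-- what changed: Replaces A's two index-based while-loop walks (up then down, with peak checks) by a single fold of a three-flag finite-state machine over adjacent pairs, with no index arithmetic.
import Mathlib
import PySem

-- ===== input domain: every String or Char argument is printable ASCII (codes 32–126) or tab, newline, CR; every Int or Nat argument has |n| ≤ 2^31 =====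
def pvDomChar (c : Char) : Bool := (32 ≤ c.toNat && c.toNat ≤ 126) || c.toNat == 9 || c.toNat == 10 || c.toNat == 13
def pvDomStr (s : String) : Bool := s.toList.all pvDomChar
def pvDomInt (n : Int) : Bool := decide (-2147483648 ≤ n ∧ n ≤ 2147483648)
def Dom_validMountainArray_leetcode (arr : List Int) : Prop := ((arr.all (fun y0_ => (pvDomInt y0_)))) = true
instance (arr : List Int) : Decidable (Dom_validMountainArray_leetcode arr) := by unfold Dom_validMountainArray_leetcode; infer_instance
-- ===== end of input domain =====

-- B replaces A's two index-based while-loop walks by a single fold of a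
-- three-flag finite-state machine over adjacent pairs (alternative decomposition, same cost).

-- ===== PORT A =====
def walkUpA (arr : List Int) (i : Nat) : Nat :=
  -- 'while i+1 < N and arr[i] < arr[i+1]: i += 1' (indices are in range by the guard, so getD is exact)
  if i + 1 < arr.length ∧ arr.getD i 0 < arr.getD (i + 1) 0 then
    walkUpA arr (i + 1)
  else i
termination_by arr.length - i
decreasing_by omega

def walkDownA (arr : List Int) (i : Nat) : Nat :=
  -- 'while i+1 < N and arr[i] > arr[i+1]: i += 1'
  if i + 1 < arr.length ∧ arr.getD i 0 > arr.getD (i + 1) 0 then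
    walkDownA arr (i + 1)
  else i
termination_by arr.length - i
decreasing_by omega

def validMountainArray_leetcode (arr : List Int) : Bool :=
  let N := arr.length
  let i := walkUpA arr 0
  -- Python's 'i == N-1' with N = 0 is 0 == -1 (false), but then 'i == 0' already fired,
  -- so Nat subtraction N - 1 is faithful here.
  if i = 0 ∨ i = N - 1 then false
  else decide (walkDownA arr i = N - 1)

-- ===== PORT B =====
def stepB (st : Bool × Bool × Bool) (p : Int × Int) : Bool × Bool × Bool :=
  let (up, down, ok) := st
  if p.1 < p.2 then (true, down, ok && !down)
  else if p.1 > p.2 then (up, true, ok && up)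
  else (up, down, false)

def validMountainArray_leetcode_alt (arr : List Int) : Bool :=
  let r := (arr.zip arr.tail).foldl stepB (false, false, true)
  r.2.2 && r.1 && r.2.1

-- ===== PRECONDITION & SPEC =====
def Spec_validMountainArray_leetcode (arr : List Int) (out : Bool) : Prop := out = validMountainArray_leetcode_alt arr
instance (arr : List Int) (out : Bool) : Decidable (Spec_validMountainArray_leetcode arr out) := by unfold Spec_validMountainArray_leetcode; infer_instance

-- ===== CLAIM (what is proved, stated in full; the proofs are below) =====
def Claim_equal_validMountainArray_leetcode : Prop := ∀ (arr : List Int), Dom_validMountainArray_leetcode arr → Spec_validMountainArray_leetcode arr (validMountainArray_leetcode arr)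

-- ===== LEMMAS AND PROOFS =====

-- reference formulation: strict ascent, then strict descent, both nonempty
def refDown : List Int → Bool
  | a :: b :: t => decide (a > b) && refDown (b :: t)
  | _ => true

def refAfterUp : List Int → Bool
  | a :: b :: t => if a < b then refAfterUp (b :: t) else (decide (a > b) && refDown (b :: t))
  | _ => false

def refM : List Int → Bool
  | a :: b :: t => decide (a < b) && refAfterUp (b :: t)
  | _ => false

-- lengths of the maximal strictly increasing / decreasing prefix runs
def ascLen : List Int → Nat
  | a :: b :: t => if a < b then ascLen (b :: t) + 1 else 0
  | _ => 0

def descLen : List Int → Nat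
  | a :: b :: t => if a > b then descLen (b :: t) + 1 else 0
  | _ => 0

theorem ascLen_short (l : List Int) (h : l.length ≤ 1) : ascLen l = 0 := by
  match l with
  | [] => rfl
  | [_] => rfl
  | _ :: _ :: _ => simp at h

theorem descLen_short (l : List Int) (h : l.length ≤ 1) : descLen l = 0 := by
  match l with
  | [] => rfl
  | [_] => rfl
  | _ :: _ :: _ => simp at h

theorem walkUpA_eq (l : List Int) (i : Nat) : walkUpA l i = i + ascLen (l.drop i) := by
  induction i using walkUpA.induct (arr := l) with
  | case1 i h ih =>
    rw [walkUpA, if_pos h, ih]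
    obtain ⟨h1, h2⟩ := h
    have hi : i < l.length := by omega
    rw [List.drop_eq_getElem_cons hi, List.drop_eq_getElem_cons h1]
    rw [List.getD_eq_getElem l 0 hi, List.getD_eq_getElem l 0 h1] at h2
    simp [ascLen, h2]
    omega
  | case2 i h =>
    rw [walkUpA, if_neg h]
    by_cases h1 : i + 1 < l.length
    · have hi : i < l.length := by omega
      have h2 : ¬ l.getD i 0 < l.getD (i + 1) 0 := by tauto
      rw [List.drop_eq_getElem_cons hi, List.drop_eq_getElem_cons h1]
      rw [List.getD_eq_getElem l 0 hi, List.getD_eq_getElem l 0 h1] at h2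
      simp [ascLen, h2]
    · rw [ascLen_short _ (by simp [List.length_drop]; omega)]; omega

theorem walkDownA_eq (l : List Int) (i : Nat) : walkDownA l i = i + descLen (l.drop i) := by
  induction i using walkDownA.induct (arr := l) with
  | case1 i h ih =>
    rw [walkDownA, if_pos h, ih]
    obtain ⟨h1, h2⟩ := h
    have hi : i < l.length := by omega
    rw [List.drop_eq_getElem_cons hi, List.drop_eq_getElem_cons h1]
    rw [List.getD_eq_getElem l 0 hi, List.getD_eq_getElem l 0 h1] at h2
    simp [descLen, h2]
    omega
  | case2 i h =>
    rw [walkDownA, if_neg h]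
    by_cases h1 : i + 1 < l.length
    · have hi : i < l.length := by omega
      have h2 : ¬ l.getD i 0 > l.getD (i + 1) 0 := by tauto
      rw [List.drop_eq_getElem_cons hi, List.drop_eq_getElem_cons h1]
      rw [List.getD_eq_getElem l 0 hi, List.getD_eq_getElem l 0 h1] at h2
      simp [descLen, h2]
    · rw [descLen_short _ (by simp [List.length_drop]; omega)]; omega

-- B-side: the automaton's invariants
theorem fold_ok_false (ps : List (Int × Int)) : ∀ u d, ((ps.foldl stepB (u, d, false)).2.2) = false := by
  induction ps with
  | nil => intro u d; rfl
  | cons p ps ih =>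
    intro u d
    simp only [List.foldl_cons, stepB]
    split
    · simpa using ih true d
    · split
      · simpa using ih u true
      · simpa using ih u d

theorem fold_up_true (ps : List (Int × Int)) : ∀ d ok, ((ps.foldl stepB (true, d, ok)).1) = true := by
  induction ps with
  | nil => intro d ok; rfl
  | cons p ps ih =>
    intro d ok
    simp only [List.foldl_cons, stepB]
    split
    · exact ih _ _
    · split
      · exact ih _ _
      · exact ih _ _

theorem fold_down_true (ps : List (Int × Int)) : ∀ u ok, ((ps.foldl stepB (u, true, ok)).2.1) = true := by
  induction ps with
  | nil => intro u ok; rfl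
  | cons p ps ih =>
    intro u ok
    simp only [List.foldl_cons, stepB]
    split
    · exact ih _ _
    · split
      · exact ih _ _
      · exact ih _ _

theorem foldTT (l : List Int) : (((l.zip l.tail).foldl stepB (true, true, true)).2.2) = refDown l := by
  induction l with
  | nil => rfl
  | cons a l ih =>
    match l with
    | [] => rfl
    | b :: t =>
      simp only [List.tail_cons, List.zip_cons_cons, List.foldl_cons, stepB] at ih ⊢
      rcases lt_trichotomy a b with h | h | h
      · rw [if_pos h]
        simp only [Bool.not_true, Bool.and_false]
        rw [fold_ok_false]
        simp [refDown, not_lt_of_gt, h]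
      · subst h
        rw [if_neg (lt_irrefl a), if_neg (lt_irrefl a)]
        rw [fold_ok_false]
        simp [refDown]
      · rw [if_neg (not_lt.mpr (le_of_lt h)), if_pos h]
        simp only [Bool.and_true]
        rw [ih]
        simp [refDown, h]

theorem foldUp (l : List Int) :
    (((l.zip l.tail).foldl stepB (true, false, true)).2.2 && ((l.zip l.tail).foldl stepB (true, false, true)).1
      && ((l.zip l.tail).foldl stepB (true, false, true)).2.1) = refAfterUp l := by
  induction l with
  | nil => rfl
  | cons a l ih =>
    match l with
    | [] => rfl
    | b :: t =>
      simp only [List.tail_cons, List.zip_cons_cons, List.foldl_cons, stepB] at ih ⊢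
      rcases lt_trichotomy a b with h | h | h
      · rw [if_pos h]
        simp only [Bool.not_false, Bool.and_true]
        rw [refAfterUp, if_pos h]
        exact ih
      · subst h
        rw [if_neg (lt_irrefl a), if_neg (lt_irrefl a)]
        rw [fold_ok_false]
        simp [refAfterUp]
      · rw [if_neg (not_lt.mpr (le_of_lt h)), if_pos h]
        simp only [Bool.and_true]
        have hTT := foldTT (b :: t)
        simp only [List.tail_cons] at hTT
        rw [hTT, fold_up_true, fold_down_true]
        rw [refAfterUp, if_neg (not_lt.mpr (le_of_lt h))]
        simp [h]

theorem B_eq_ref (l : List Int) : validMountainArray_leetcode_alt l = refM l := by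
  match l with
  | [] => rfl
  | [_] => rfl
  | a :: b :: t =>
    unfold validMountainArray_leetcode_alt
    simp only [List.tail_cons, List.zip_cons_cons, List.foldl_cons, stepB]
    rcases lt_trichotomy a b with h | h | h
    · rw [if_pos h]
      simp only [Bool.not_false, Bool.and_true]
      have hU := foldUp (b :: t)
      simp only [List.tail_cons] at hU
      rw [refM, decide_eq_true h, Bool.true_and, ← hU]
    · subst h
      rw [if_neg (lt_irrefl a), if_neg (lt_irrefl a)]
      rw [fold_ok_false]
      simp [refM]
    · rw [if_neg (not_lt.mpr (le_of_lt h)), if_pos h]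
      simp only [Bool.and_false]
      rw [fold_ok_false]
      simp [refM, not_lt.mpr (le_of_lt h)]

-- A-side: relate the walk lengths to the reference
theorem refDown_iff (l : List Int) : refDown l = decide (descLen l = l.length - 1) := by
  induction l with
  | nil => rfl
  | cons a l ih =>
    match l with
    | [] => rfl
    | b :: t =>
      rw [refDown, descLen]
      by_cases h : a > b
      · rw [if_pos h, decide_eq_true h, Bool.true_and, ih]
        have : (descLen (b :: t) + 1 = (a :: b :: t).length - 1) ↔ (descLen (b :: t) = (b :: t).length - 1) := by
          simp only [List.length_cons]; omega
        rw [decide_eq_decide.mpr this]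
      · rw [if_neg h, decide_eq_false h, Bool.false_and]
        have : ¬ ((0 : Nat) = (a :: b :: t).length - 1) := by simp
        rw [decide_eq_false this]

def GA (l : List Int) : Bool :=
  if ascLen l = l.length - 1 then false
  else decide (ascLen l + descLen (l.drop (ascLen l)) = l.length - 1)

theorem GA_eq_refAfterUp (l : List Int) : GA l = refAfterUp l := by
  induction l with
  | nil => rfl
  | cons a l ih =>
    match l with
    | [] => rfl
    | b :: t =>
      by_cases h : a < b
      · rw [refAfterUp, if_pos h, ← ih]
        unfold GA
        rw [ascLen, if_pos h]
        have hc : (ascLen (b :: t) + 1 = (a :: b :: t).length - 1) ↔ (ascLen (b :: t) = (b :: t).length - 1) := by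
          simp only [List.length_cons]; omega
        rw [if_congr hc rfl rfl]
        have hd : (a :: b :: t).drop (ascLen (b :: t) + 1) = (b :: t).drop (ascLen (b :: t)) := rfl
        rw [hd]
        have hs : (ascLen (b :: t) + 1 + descLen ((b :: t).drop (ascLen (b :: t))) = (a :: b :: t).length - 1)
            ↔ (ascLen (b :: t) + descLen ((b :: t).drop (ascLen (b :: t))) = (b :: t).length - 1) := by
          simp only [List.length_cons]; omega
        rw [decide_eq_decide.mpr hs]
      · rw [refAfterUp, if_neg h]
        unfold GA
        rw [ascLen, if_neg h]
        have hne : ¬ ((0 : Nat) = (a :: b :: t).length - 1) := by simp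
        rw [if_neg hne, List.drop_zero, Nat.zero_add, ← refDown_iff]
        rw [refDown]

theorem A_eq_ref (l : List Int) : validMountainArray_leetcode l = refM l := by
  match l with
  | [] => simp [validMountainArray_leetcode, walkUpA_eq]; rfl
  | [_] => simp [validMountainArray_leetcode, walkUpA_eq]; rfl
  | a :: b :: t =>
    simp only [validMountainArray_leetcode]
    rw [walkUpA_eq, List.drop_zero, Nat.zero_add]
    by_cases h : a < b
    · have h0 : ascLen (a :: b :: t) = ascLen (b :: t) + 1 := by rw [ascLen, if_pos h]
      have hne : ¬ ascLen (a :: b :: t) = 0 := by omega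
      rw [refM, decide_eq_true h, Bool.true_and, ← GA_eq_refAfterUp]
      unfold GA
      rw [h0]
      have hc : (ascLen (b :: t) + 1 = (a :: b :: t).length - 1) ↔ (ascLen (b :: t) = (b :: t).length - 1) := by
        simp only [List.length_cons]; omega
      have hd : (a :: b :: t).drop (ascLen (b :: t) + 1) = (b :: t).drop (ascLen (b :: t)) := rfl
      have hs : (ascLen (b :: t) + 1 + descLen ((b :: t).drop (ascLen (b :: t))) = (a :: b :: t).length - 1)
          ↔ (ascLen (b :: t) + descLen ((b :: t).drop (ascLen (b :: t))) = (b :: t).length - 1) := by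
        simp only [List.length_cons]; omega
      by_cases hpk : ascLen (b :: t) + 1 = (a :: b :: t).length - 1
      · rw [if_pos (Or.inr hpk), if_pos (hc.mp hpk)]
      · rw [if_neg (fun hor => hor.elim (by omega) hpk), if_neg (by rw [hc] at hpk; exact hpk)]
        rw [walkDownA_eq, hd, decide_eq_decide.mpr hs]
    · have h0 : ascLen (a :: b :: t) = 0 := by rw [ascLen, if_neg h]
      rw [h0, if_pos (Or.inl rfl)]
      rw [refM, decide_eq_false h, Bool.false_and]

-- ===== VERDICT (by name: the statement is the Claim_ definition above) =====
theorem validMountainArray_leetcode_spec : Claim_equal_validMountainArray_leetcode := by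
  intro arr _
  unfold Spec_validMountainArray_leetcode
  rw [A_eq_ref, B_eq_ref]
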